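-- pv_equiv track=rewrite | github.com/Ryancooijmans/AOC | 2022/AOC8-1.py | treehidden
-- ===== SOURCE A (Python) =====
-- def treehidden(x,y,array):
--     i = x
--     if(x == 0 or x == len(array[x])-1):
--         return False
--     i -= 1
--     while i >= 0:
--         if(array[i][y] >= array[x][y]):
--             i = x + 1
--             while i < len(array[x]):
--                 if(array[i][y] >= array[x][y]):
--                     return True
--                 i += 1
--             return False
--         i -= 1
--     return False
-- ===== SOURCE B (Python) =====
-- def treehidden(x, y, array):
--     n = len(array[x])
--     if x == 0 or x == n - 1:
--         return False
--     h = array[x][y]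
--     above = below = None
--     for i in range(n):
--         v = array[i][y]
--         if i < x:
--             above = v if above is None or v > above else above
--         elif i > x:
--             below = v if below is None or v > below else below
--     return above is not None and above >= h and below is not None and below >= h
-- ===== Notes on version B (the rewrite author's own statement) =====
-- stated objective: alternative
-- what changed: Replaced A's nested short-circuit scans (descend to find an above blocker, then ascend to find a below blocker) by a single full pass over the column that accumulates the running maxima above and below x and compares both maxima to the tree height at the end.
-- outside the precondition, e.g. on treehidden(2, 1, [[], [0, 1, 2, 2], [0, 0, 2, 0, 0], [3, 1, 2, 0]]): A returns True, B raises IndexError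
import Mathlib
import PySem

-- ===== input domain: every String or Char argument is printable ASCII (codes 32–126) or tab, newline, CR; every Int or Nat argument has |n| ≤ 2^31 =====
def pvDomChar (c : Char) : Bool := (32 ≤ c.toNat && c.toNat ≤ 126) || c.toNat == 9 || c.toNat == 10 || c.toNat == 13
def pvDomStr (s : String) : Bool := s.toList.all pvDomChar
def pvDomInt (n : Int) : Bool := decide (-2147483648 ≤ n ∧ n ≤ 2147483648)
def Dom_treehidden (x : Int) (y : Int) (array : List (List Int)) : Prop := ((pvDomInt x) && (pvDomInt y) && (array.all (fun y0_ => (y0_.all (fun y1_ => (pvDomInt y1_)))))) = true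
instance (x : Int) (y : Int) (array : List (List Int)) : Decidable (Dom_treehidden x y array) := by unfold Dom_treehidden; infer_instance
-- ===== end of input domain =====

-- B changes: A's nested short-circuit scans (find an above-blocker, then scan below) become ONE pass
-- over the whole column accumulating the running maxima above and below x, compared to h at the end
-- (objective: alternative decomposition, same cost).

-- ===== PORT A =====
-- while i < len(array[x]): ascending inner scan of A
def pvA_loopUp (y : Int) (array : List (List Int)) (x : Int) (rowlen : Int) (i : Int) : Bool :=
  if _h : i < rowlen then
    if PySem.List.pyGetD (PySem.List.pyGetD array i []) y 0 ≥ PySem.List.pyGetD (PySem.List.pyGetD array x []) y 0 then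
      true
    else pvA_loopUp y array x rowlen (i + 1)
  else false
termination_by (rowlen - i).toNat
decreasing_by omega

-- while i >= 0: descending outer scan of A
def pvA_loopDown (y : Int) (array : List (List Int)) (x : Int) (i : Int) : Bool :=
  if _h : 0 ≤ i then
    if PySem.List.pyGetD (PySem.List.pyGetD array i []) y 0 ≥ PySem.List.pyGetD (PySem.List.pyGetD array x []) y 0 then
      pvA_loopUp y array x ((PySem.List.pyGetD array x []).length : Int) (x + 1)
    else pvA_loopDown y array x (i - 1)
  else false
termination_by (i + 1).toNat
decreasing_by omega

def treehidden (x : Int) (y : Int) (array : List (List Int)) : Bool :=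
  if x == 0 || x == ((PySem.List.pyGetD array x []).length : Int) - 1 then false
  else pvA_loopDown y array x (x - 1)

-- ===== PORT B =====
-- above = v if above is None or v > above else above
def pvB_upd (s : Option Int) (v : Int) : Option Int :=
  match s with
  | none => some v
  | some a => if v > a then some v else some a

-- one iteration of B's single for-loop over the column
def pvB_step (x y : Int) (array : List (List Int)) (s : Option Int × Option Int) (i : Int) :
    Option Int × Option Int :=
  let v := PySem.List.pyGetD (PySem.List.pyGetD array i []) y 0
  if i < x then (pvB_upd s.1 v, s.2)
  else if x < i then (s.1, pvB_upd s.2 v)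
  else s

-- above is not None and above >= h
def pvB_test (h : Int) (s : Option Int) : Bool :=
  match s with
  | none => false
  | some a => decide (a ≥ h)

def treehidden_alt (x : Int) (y : Int) (array : List (List Int)) : Bool :=
  if x == 0 || x == ((PySem.List.pyGetD array x []).length : Int) - 1 then false
  else
    pvB_test (PySem.List.pyGetD (PySem.List.pyGetD array x []) y 0)
      (((PySem.List.pyRange 0 ((PySem.List.pyGetD array x []).length : Int) 1).foldl
          (pvB_step x y array) (none, none)).1)
    && pvB_test (PySem.List.pyGetD (PySem.List.pyGetD array x []) y 0)
      (((PySem.List.pyRange 0 ((PySem.List.pyGetD array x []).length : Int) 1).foldl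
          (pvB_step x y array) (none, none)).2)

-- ===== PRECONDITION & SPEC =====
-- Pre_ excludes x outside the row-index range (Python A raises IndexError on array[x]) and, for any x
-- not stopped by the edge guard, non-square grids or out-of-range y, on which A's short-circuit scans
-- can return before hitting the IndexError that B's full column pass always hits.
def Pre_treehidden (x : Int) (y : Int) (array : List (List Int)) : Prop :=
  -(array.length : Int) ≤ x ∧ x < (array.length : Int) ∧
  (x = 0 ∨ x = ((PySem.List.pyGetD array x []).length : Int) - 1 ∨
    ((∀ r ∈ array, r.length = array.length) ∧ -(array.length : Int) ≤ y ∧ y < (array.length : Int)))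
instance (x : Int) (y : Int) (array : List (List Int)) : Decidable (Pre_treehidden x y array) := by
  unfold Pre_treehidden; infer_instance

def pvWitness_treehidden : Int × Int × List (List Int) := (1, 0, [[1, 2, 3], [0, 1, 2], [2, 2, 2]])

def Spec_treehidden (x : Int) (y : Int) (array : List (List Int)) (out : Bool) : Prop := out = treehidden_alt x y array
instance (x : Int) (y : Int) (array : List (List Int)) (out : Bool) : Decidable (Spec_treehidden x y array out) := by
  unfold Spec_treehidden; infer_instance

-- ===== CLAIM =====
def Claim_equal_treehidden : Prop := ∀ (x : Int) (y : Int) (array : List (List Int)), Dom_treehidden x y array → Pre_treehidden x y array → Spec_treehidden x y array (treehidden x y array)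

-- ===== LEMMAS AND PROOFS =====
theorem pvA_loopUp_eq_any (y : Int) (array : List (List Int)) (x rowlen : Int) :
    ∀ (n : Nat) (i : Int), (rowlen - i).toNat = n →
      pvA_loopUp y array x rowlen i
        = (PySem.List.pyRange i rowlen 1).any (fun j =>
            PySem.List.pyGetD (PySem.List.pyGetD array j []) y 0 ≥ PySem.List.pyGetD (PySem.List.pyGetD array x []) y 0) := by
  intro n
  induction n with
  | zero =>
      intro i hi
      rw [pvA_loopUp, PySem.List.pyRange_one_eq_nil (by omega)]
      simp only [List.any_nil]
      rw [dif_neg (by omega)]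
  | succ m ih =>
      intro i hi
      have hlt : i < rowlen := by omega
      rw [pvA_loopUp, dif_pos hlt, PySem.List.pyRange_one_cons hlt]
      simp only [List.any_cons]
      by_cases hb : PySem.List.pyGetD (PySem.List.pyGetD array i []) y 0 ≥ PySem.List.pyGetD (PySem.List.pyGetD array x []) y 0
      · simp [hb]
      · rw [if_neg hb, ih (i + 1) (by omega)]
        simp [hb]

theorem pvA_loopDown_eq_any (y : Int) (array : List (List Int)) (x : Int) :
    ∀ (n : Nat) (i : Int), (i + 1).toNat = n →
      pvA_loopDown y array x i
        = (((PySem.List.pyRange 0 (i + 1) 1).any (fun j =>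
              PySem.List.pyGetD (PySem.List.pyGetD array j []) y 0 ≥ PySem.List.pyGetD (PySem.List.pyGetD array x []) y 0))
           && pvA_loopUp y array x ((PySem.List.pyGetD array x []).length : Int) (x + 1)) := by
  intro n
  induction n with
  | zero =>
      intro i hi
      rw [pvA_loopDown, PySem.List.pyRange_one_eq_nil (by omega)]
      simp only [List.any_nil, Bool.false_and]
      rw [dif_neg (by omega)]
  | succ m ih =>
      intro i hi
      have h0 : (0 : Int) ≤ i := by omega
      rw [pvA_loopDown, dif_pos h0,
          PySem.List.pyRange_one_append 0 i (i + 1) (by omega) (by omega),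
          PySem.List.pyRange_one_singleton]
      simp only [List.any_append, List.any_cons, List.any_nil]
      by_cases hb : PySem.List.pyGetD (PySem.List.pyGetD array i []) y 0 ≥ PySem.List.pyGetD (PySem.List.pyGetD array x []) y 0
      · simp [hb]
      · rw [if_neg hb, ih (i - 1) (by omega)]
        have : i - 1 + 1 = i := by omega
        rw [this]
        simp [hb]

-- pvB_test distributes over pvB_upd as a boolean 'or'
theorem pvB_test_upd (h : Int) (s : Option Int) (v : Int) :
    pvB_test h (pvB_upd s v) = (pvB_test h s || decide (v ≥ h)) := by
  cases s with
  | none => simp [pvB_upd, pvB_test]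
  | some a =>
      simp only [pvB_upd, pvB_test]
      split_ifs with hv <;> simp <;> omega

-- B's single-pass fold computes, for each side, 'some element on that side ≥ h'
theorem pvB_fold_test (x y h : Int) (array : List (List Int)) (m : Nat) :
    (pvB_test h (((PySem.List.pyRange 0 (m : Int) 1).foldl (pvB_step x y array) (none, none)).1)
      = (PySem.List.pyRange 0 (m : Int) 1).any (fun i =>
          decide (i < x) && decide (PySem.List.pyGetD (PySem.List.pyGetD array i []) y 0 ≥ h)))
    ∧ (pvB_test h (((PySem.List.pyRange 0 (m : Int) 1).foldl (pvB_step x y array) (none, none)).2)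
      = (PySem.List.pyRange 0 (m : Int) 1).any (fun i =>
          decide (x < i) && decide (PySem.List.pyGetD (PySem.List.pyGetD array i []) y 0 ≥ h))) := by
  induction m with
  | zero =>
      rw [PySem.List.pyRange_one_eq_nil (by omega)]
      simp [pvB_test]
  | succ k ih =>
      have hsplit : PySem.List.pyRange 0 ((k + 1 : Nat) : Int) 1
          = PySem.List.pyRange 0 (k : Int) 1 ++ [(k : Int)] := by
        have : ((k + 1 : Nat) : Int) = (k : Int) + 1 := by push_cast; ring
        rw [this, PySem.List.pyRange_one_succ_right (by omega)]
      rw [hsplit]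
      simp only [List.foldl_append, List.foldl_cons, List.foldl_nil, List.any_append,
        List.any_cons, List.any_nil, Bool.or_false]
      obtain ⟨ih1, ih2⟩ := ih
      set s := (PySem.List.pyRange 0 (k : Int) 1).foldl (pvB_step x y array) (none, none) with hs
      by_cases h1 : (k : Int) < x
      · have h2 : ¬ x < (k : Int) := by omega
        simp only [pvB_step, if_pos h1]
        simp [pvB_test_upd, ih1, ih2, h1, h2]
      · by_cases h2 : x < (k : Int)
        · simp only [pvB_step, if_neg h1, if_pos h2]
          simp [pvB_test_upd, ih1, ih2, h1, h2]
        · simp only [pvB_step, if_neg h1, if_neg h2]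
          simp [ih1, ih2, h1, h2]

-- restricting 'i < x' inside any over [0,n) = any over [0,x)
theorem pv_any_below (p : Int → Bool) (x n : Int) (_h0 : 0 ≤ x) (hxn : x ≤ n) :
    (PySem.List.pyRange 0 n 1).any (fun i => decide (i < x) && p i)
      = (PySem.List.pyRange 0 x 1).any p := by
  rw [Bool.eq_iff_iff]
  simp only [List.any_eq_true, PySem.List.mem_pyRange_one, Bool.and_eq_true, decide_eq_true_eq]
  constructor
  · rintro ⟨i, ⟨hi0, _⟩, hix, hp⟩; exact ⟨i, ⟨hi0, hix⟩, hp⟩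
  · rintro ⟨i, ⟨hi0, hix⟩, hp⟩; exact ⟨i, ⟨hi0, by omega⟩, hix, hp⟩

-- restricting 'x < i' inside any over [0,n) = any over [x+1,n)
theorem pv_any_above (p : Int → Bool) (x n : Int) (_h0 : 0 ≤ x) :
    (PySem.List.pyRange 0 n 1).any (fun i => decide (x < i) && p i)
      = (PySem.List.pyRange (x + 1) n 1).any p := by
  rw [Bool.eq_iff_iff]
  simp only [List.any_eq_true, PySem.List.mem_pyRange_one, Bool.and_eq_true, decide_eq_true_eq]
  constructor
  · rintro ⟨i, ⟨_, hin⟩, hxi, hp⟩; exact ⟨i, ⟨by omega, hin⟩, hp⟩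
  · rintro ⟨i, ⟨hxi, hin⟩, hp⟩; exact ⟨i, ⟨by omega, hin⟩, by omega, hp⟩

-- when x < 0, the 'i < x' side of any over [0,n) is empty
theorem pv_any_below_neg (p : Int → Bool) (x n : Int) (hx : x < 0) :
    (PySem.List.pyRange 0 n 1).any (fun i => decide (i < x) && p i) = false := by
  rw [List.any_eq_false]
  intro i hi
  rw [PySem.List.mem_pyRange_one] at hi
  simp only [Bool.and_eq_true, decide_eq_true_eq, not_and]
  intro h; omega

-- ===== VERDICT =====
theorem treehidden_spec : Claim_equal_treehidden := by
  intro x y array _hdom hpre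
  obtain ⟨hxl, hxu, hbr⟩ := hpre
  unfold Spec_treehidden treehidden treehidden_alt
  by_cases hg : (x == 0 || x == ((PySem.List.pyGetD array x []).length : Int) - 1) = true
  · rw [if_pos hg, if_pos hg]
  · rw [if_neg hg, if_neg hg]
    simp only [Bool.or_eq_true, beq_iff_eq, not_or] at hg
    obtain ⟨hx0, hxn1⟩ := hg
    -- the first two Pre_ branches contradict the guard
    rcases hbr with h | h | h
    · exact absurd h hx0
    · exact absurd h hxn1
    obtain ⟨hsq, _, _⟩ := h
    set n : Int := ((PySem.List.pyGetD array x []).length : Int) with hn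
    have hnlen : n = (array.length : Int) := by
      have hmem : PySem.List.pyGetD array x [] ∈ array := by
        apply PySem.List.pyGetD_mem
        constructor <;> omega
      rw [hn, hsq _ hmem]
    have hA := pvA_loopDown_eq_any y array x (x - 1 + 1).toNat (x - 1) rfl
    have hx1 : x - 1 + 1 = x := by omega
    rw [hx1] at hA
    rw [hA, pvA_loopUp_eq_any y array x n ((n - (x + 1)).toNat) (x + 1) rfl]
    have hfold := pvB_fold_test x y (PySem.List.pyGetD (PySem.List.pyGetD array x []) y 0) array n.toNat
    have hcast : ((n.toNat : Int)) = n := by omega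
    rw [hcast] at hfold
    obtain ⟨hf1, hf2⟩ := hfold
    rw [hf1, hf2]
    by_cases hxneg : x < 0
    · rw [PySem.List.pyRange_one_eq_nil (by omega), pv_any_below_neg _ _ _ hxneg]
      simp
    · rw [pv_any_below _ x n (by omega) (by omega), pv_any_above _ x n (by omega)]
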